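-- pv_equiv track=rewrite | github.com/DiegoAPaez/advent-of-code | day25.py | solve
-- ===== SOURCE A (Python) =====
-- def solve(data):
--     keys = []
--     locks = []
--
--     # Process each block of data
--     for block in data:
--         # Convert each line in the block to a binary number
--         binary_representation = [int("".join("1" if x == "#" else "0" for x in line), 2)
--                                  for line in zip(*block)]
--
--         # Determine if the block is a key or a lock
--         if block[0][0] == '.':
--             keys.append(binary_representation)
--         else:
--             locks.append(binary_representation)
--
--     valid_pairs_count = 0
--
--     # Check each lock against each key
--     for lock in locks:
--         for key in keys:
--             # Ensure no overlapping pins using bitwise AND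
--             if all(lock_pin & key_pin == 0 for lock_pin, key_pin in zip(lock, key)):
--                 valid_pairs_count += 1
--
--     return valid_pairs_count
-- ===== SOURCE B (Python) =====
-- def solve(data):
--     lock_cells = []     # per-lock set of occupied (column, height-from-bottom) cells
--     key_cells = []
--     for block in data:
--         rows = len(block)
--         width = min(len(line) for line in block)
--         cells = {(c, rows - 1 - r)
--                  for r, line in enumerate(block)
--                  for c in range(width)
--                  if line[c] == '#'}
--         if block[0][0] == '.':
--             key_cells.append(cells)
--         else:
--             lock_cells.append(cells)
--     # inverted index: cell -> set of ids of the locks occupying that cell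
--     index = {}
--     for i, lock in enumerate(lock_cells):
--         for cell in lock:
--             index.setdefault(cell, set()).add(i)
--     # complement counting: a key fits every lock except those sharing one of its cells
--     total = 0
--     for key in key_cells:
--         bad = set()
--         for cell in key:
--             bad |= index.get(cell, set())
--         total += len(lock_cells) - len(bad)
--     return total
-- ===== Notes on version B (the rewrite author's own statement) =====
-- stated objective: alternative
-- what changed: B replaces A's all-pairs inner disjointness scan by an inverted index mapping each occupied cell to the set of lock ids occupying it, and counts per key by complement: all locks minus the union of the id-sets of the key's cells.
import Mathlib
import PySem

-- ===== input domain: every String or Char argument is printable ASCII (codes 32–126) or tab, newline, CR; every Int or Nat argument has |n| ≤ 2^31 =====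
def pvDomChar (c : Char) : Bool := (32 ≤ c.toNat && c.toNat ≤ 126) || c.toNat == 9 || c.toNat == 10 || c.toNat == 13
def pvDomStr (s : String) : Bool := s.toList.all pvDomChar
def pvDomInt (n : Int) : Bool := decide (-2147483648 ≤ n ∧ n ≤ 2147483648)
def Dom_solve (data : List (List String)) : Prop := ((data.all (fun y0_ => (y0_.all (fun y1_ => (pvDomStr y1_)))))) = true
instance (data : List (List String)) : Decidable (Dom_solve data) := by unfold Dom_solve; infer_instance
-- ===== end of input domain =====

-- B drops A's all-pairs disjointness loop: it builds an inverted index cell → set of lock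
-- ids, and counts per key by complement (all locks minus the union of the id-sets of its
-- occupied cells) — a different counting algorithm, same asymptotic cost (objective: alternative).

-- ===== PORT A =====
-- min(len(line) for line in block), i.e. the number of columns zip(*block) yields (0 for the empty block)
def pvWidthA (block : List (List Char)) : Nat :=
  match block with
  | [] => 0
  | l :: ls => ls.foldl (fun m t => min m t.length) l.length

-- zip(*block): for each i below the minimal line length, the tuple of the i-th characters
-- (the getD default is never read: i < pvWidthA block ≤ every line length)
def pvColsA (block : List (List Char)) : List (List Char) :=
  (List.range (pvWidthA block)).map (fun i => block.map (fun l => l.getD i ' '))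

-- int(ds, 2) for the strings A builds: ds is nonempty (Pre_) and consists of '0'/'1' only,
-- so CPython's base-2 parse is exactly this fold (no sign/whitespace/underscore can occur)
def pvBinNat (ds : List Char) : Nat := ds.foldl (fun a c => 2 * a + (if c == '1' then 1 else 0)) 0

-- [int("".join("1" if x == "#" else "0" for x in line), 2) for line in zip(*block)]
def pvBinRep (block : List (List Char)) : List Int :=
  (pvColsA block).map (fun col => (pvBinNat (col.map (fun x => if x == '#' then '1' else '0')) : Nat))

def solve (data : List (List String)) : Int :=
  let p := data.foldl
    (fun (acc : List (List Int) × List (List Int)) b =>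
      match PySem.List.pyGet? b 0 with
      | none => acc          -- block[0]: IndexError (empty block), excluded by Pre_
      | some s =>
        match PySem.Str.pyGet? s 0 with
        | none => acc        -- block[0][0]: IndexError (empty first line), excluded by Pre_
        | some ch =>
          if ch == '.' then (acc.1 ++ [pvBinRep (b.map String.toList)], acc.2)
          else (acc.1, acc.2 ++ [pvBinRep (b.map String.toList)]))
    ([], [])
  p.2.foldl (fun cnt lock =>
    p.1.foldl (fun cnt key =>
      if ((lock.zip key).all fun q => PySem.Int.band q.1 q.2 == 0) then cnt + 1 else cnt) cnt) 0

-- ===== PORT B =====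
-- min(len(line) for line in block)  (ValueError on an empty block, excluded by Pre_)
def pvWidthB (block : List (List Char)) : Int :=
  (PySem.List.min? (block.map (fun l => (l.length : Int))) (fun x => x)).getD 0

-- the comprehension's elements: (c, rows - 1 - r) for r, line in enumerate(block) for c in range(width) if line[c] == '#'
def pvCellsList (block : List (List Char)) : List (Int × Int) :=
  (PySem.List.enumerate block).flatMap (fun rl =>
    ((PySem.List.pyRange 0 (pvWidthB block)).filter
        (fun c => PySem.List.pyGetD rl.2 c ' ' == '#')).map
      (fun c => (c, (block.length : Int) - 1 - rl.1)))

-- {...} set comprehension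
def pvCells (block : List (List Char)) : PySem.Set (Int × Int) :=
  PySem.Set.ofList (pvCellsList block)

-- index = {}; for i, lock in enumerate(lock_cells): for cell in lock: index.setdefault(cell, set()).add(i)
def pvIndex (locks : List (PySem.Set (Int × Int))) : PySem.Dict (Int × Int) (PySem.Set Int) :=
  (PySem.List.enumerate locks).foldl
    (fun d il => il.2.foldl
      (fun d cell => d.modify cell PySem.Set.empty (fun s => PySem.Set.add s il.1)) d)
    PySem.Dict.empty

-- bad = set(); for cell in key: bad |= index.get(cell, set())
-- (the union of sets is order-independent, so iterating the Set's list is exact)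
def pvBad (index : PySem.Dict (Int × Int) (PySem.Set Int)) (key : PySem.Set (Int × Int)) : PySem.Set Int :=
  key.foldl (fun bad cell => PySem.Set.union bad (index.getD cell PySem.Set.empty)) PySem.Set.empty

def solve_alt (data : List (List String)) : Int :=
  let p := data.foldl
    (fun (acc : List (PySem.Set (Int × Int)) × List (PySem.Set (Int × Int))) b =>
      match PySem.List.pyGet? b 0 with
      | none => acc          -- min()/block[0]: raises on an empty block, excluded by Pre_
      | some s =>
        match PySem.Str.pyGet? s 0 with
        | none => acc        -- block[0][0]: IndexError (empty first line), excluded by Pre_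
        | some ch =>
          if ch == '.' then (acc.1 ++ [pvCells (b.map String.toList)], acc.2)
          else (acc.1, acc.2 ++ [pvCells (b.map String.toList)]))
    ([], [])
  let index := pvIndex p.2
  p.1.foldl (fun total key =>
    total + ((p.2.length : Int) - PySem.Set.len (pvBad index key))) 0

-- ===== PRECONDITION & SPEC =====
-- Pre_ excludes exactly the inputs where A raises IndexError: a block with no lines
-- (block[0]) or whose first line is empty (block[0][0]); B raises there too.
def Pre_solve (data : List (List String)) : Prop :=
  ∀ b ∈ data, b ≠ [] ∧ (b.headD "").toList ≠ []
instance (data : List (List String)) : Decidable (Pre_solve data) := by unfold Pre_solve; infer_instance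

def pvWitness_solve : List (List String) := [["#.", "#."], [".#", ".."]]

def Spec_solve (data : List (List String)) (out : Int) : Prop := out = solve_alt data
instance (data : List (List String)) (out : Int) : Decidable (Spec_solve data out) := by unfold Spec_solve; infer_instance

-- ===== CLAIM (what is proved, stated in full; the proofs are below) =====
def Claim_equal_solve : Prop := ∀ (data : List (List String)), Dom_solve data → Pre_solve data → Spec_solve data (solve data)

-- ===== LEMMAS AND PROOFS =====

-- the cell (column c, height e from the bottom) of a block is occupied
def CellAt (block : List (List Char)) (c e : Nat) : Prop :=
  c < pvWidthA block ∧ e < block.length ∧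
    (block.getD (block.length - 1 - e) []).getD c ' ' = '#'

-- two blocks overlap somewhere
def Confl (L K : List (List Char)) : Prop := ∃ c e : Nat, CellAt L c e ∧ CellAt K c e

-- little-endian value of a column read bottom-up
def pvOfLE (ds : List Char) : Nat :=
  match ds with
  | [] => 0
  | c :: cs => (if c = '#' then 1 else 0) + 2 * pvOfLE cs

lemma binNat_eq_ofLE (col : List Char) :
    pvBinNat (col.map (fun x => if x == '#' then '1' else '0')) = pvOfLE col.reverse := by
  induction col using List.reverseRecOn with
  | nil => rfl
  | append_singleton cs c ih =>
    simp only [pvBinNat, List.map_append, List.foldl_append, List.map_cons, List.map_nil,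
      List.foldl_cons, List.foldl_nil, List.reverse_append, List.reverse_cons, List.reverse_nil,
      List.nil_append, List.cons_append] at *
    simp only [pvOfLE]
    simp only [beq_iff_eq] at ih ⊢
    by_cases h : c = '#' <;> simp [h] <;> omega

lemma testBit_ofLE (ds : List Char) (e : Nat) :
    (pvOfLE ds).testBit e = decide (ds.getD e '.' = '#') := by
  induction ds generalizing e with
  | nil => simp [pvOfLE, Nat.zero_testBit]
  | cons c cs ih =>
    cases e with
    | zero =>
      rw [Nat.testBit_zero]
      by_cases h : c = '#' <;> simp [pvOfLE, h, Nat.add_mul_mod_self_left]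
    | succ e =>
      rw [Nat.testBit_succ]
      have hdiv : ((if c = '#' then 1 else 0) + 2 * pvOfLE cs) / 2 = pvOfLE cs := by
        by_cases h : c = '#' <;> simp [h] <;> omega
      simp only [pvOfLE, hdiv, ih, List.getD_cons_succ]

lemma land_eq_zero_iff (m n : Nat) :
    m &&& n = 0 ↔ ∀ i, ¬(m.testBit i = true ∧ n.testBit i = true) := by
  constructor
  · intro h i hi
    have := Nat.testBit_land m n i
    rw [h, Nat.zero_testBit, hi.1, hi.2] at this
    simp at this
  · intro h
    apply Nat.eq_of_testBit_eq
    intro i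
    rw [Nat.testBit_land, Nat.zero_testBit]
    by_cases hm : m.testBit i = true
    · have := h i
      have hn : n.testBit i = false := by
        cases hh : n.testBit i
        · rfl
        · exact absurd ⟨hm, hh⟩ this
      simp [hm, hn]
    · simp [eq_false_of_ne_true hm]

-- bit e of column c of a block is exactly occupancy of cell (c, e), given c < width
lemma testBit_col (block : List (List Char)) (c e : Nat) (hc : c < pvWidthA block) :
    (pvOfLE (block.map (fun l => l.getD c ' ')).reverse).testBit e = true ↔ CellAt block c e := by
  rw [testBit_ofLE]
  by_cases he : e < block.length
  · have hlt : block.length - 1 - e < block.length := by omega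
    have h1 : (block.map (fun l => l.getD c ' ')).reverse.getD e '.'
        = (block.getD (block.length - 1 - e) []).getD c ' ' := by
      rw [← List.map_reverse, List.getD_eq_getElem?_getD, List.getElem?_map,
        List.getElem?_reverse (by simpa using he)]
      simp [List.getElem?_eq_getElem hlt, List.getD_eq_getElem?_getD]
    rw [h1]
    unfold CellAt
    simp [hc, he]
  · have h0 : (block.map (fun l => l.getD c ' ')).reverse.getD e '.' = '.' := by
      have : (block.map (fun l => l.getD c ' ')).reverse[e]? = none := by
        rw [List.getElem?_eq_none]
        simp
        omega
      rw [List.getD_eq_getElem?_getD, this]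
      rfl
    rw [h0]
    unfold CellAt
    constructor
    · intro h
      simp at h
    · intro h
      exact absurd h.2.1 he

lemma fold_min_cast (xs : List Nat) (n : Nat) :
    List.foldl min (n : Int) (xs.map (Nat.cast : Nat → Int)) = ((xs.foldl min n : Nat) : Int) := by
  induction xs generalizing n with
  | nil => rfl
  | cons x t ih => rw [List.map_cons, List.foldl_cons, List.foldl_cons, ← Nat.cast_min, ih]

lemma widthB_eq (block : List (List Char)) : pvWidthB block = ((pvWidthA block : Nat) : Int) := by
  cases block with
  | nil => rfl
  | cons l ls =>
    have hmap : ls.map (fun t => (t.length : Int)) = (ls.map List.length).map (Nat.cast : Nat → Int) := by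
      simp [List.map_map]
    simp only [pvWidthB, List.map_cons, PySem.List.min?_id_cons, Option.getD_some, pvWidthA,
      hmap, fold_min_cast]
    congr 1
    simp [List.foldl_map]

lemma mem_cellsList (block : List (List Char)) (p : Int × Int) :
    p ∈ pvCellsList block ↔ ∃ c e : Nat, p = ((c : Int), (e : Int)) ∧ CellAt block c e := by
  unfold pvCellsList
  rw [List.mem_flatMap]
  constructor
  · rintro ⟨rl, hrl, hp⟩
    obtain ⟨r, hr, rfl⟩ := (PySem.List.mem_enumerate_iff block 0 rl).mp hrl
    simp only [zero_add] at hp ⊢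
    rw [List.mem_map] at hp
    obtain ⟨cI, hcI, rfl⟩ := hp
    rw [List.mem_filter] at hcI
    obtain ⟨hcr, hhash⟩ := hcI
    rw [PySem.List.mem_pyRange_one, widthB_eq] at hcr
    obtain ⟨hc0, hcw⟩ := hcr
    have hc : cI.toNat < pvWidthA block := by omega
    rw [PySem.List.pyGetD_of_nonneg _ _ hc0, beq_iff_eq] at hhash
    have hgd : block.getD (block.length - 1 - (block.length - 1 - r)) [] = block[r] := by
      have hr' : block.length - 1 - (block.length - 1 - r) = r := by omega
      rw [hr', List.getD_eq_getElem?_getD, List.getElem?_eq_getElem hr]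
      rfl
    refine ⟨cI.toNat, block.length - 1 - r, ?_, hc, by omega, by rw [hgd]; exact hhash⟩
    simp only [Prod.mk.injEq]
    constructor
    · omega
    · push_cast
      omega
  · rintro ⟨c, e, rfl, hc, he, hhash⟩
    have hr : block.length - 1 - e < block.length := by omega
    refine ⟨(((block.length - 1 - e : Nat) : Int), block[block.length - 1 - e]),
      (PySem.List.mem_enumerate_iff block 0 _).mpr ⟨block.length - 1 - e, hr, by simp⟩, ?_⟩
    rw [List.mem_map]
    have hgd : block.getD (block.length - 1 - e) [] = block[block.length - 1 - e] := by
      rw [List.getD_eq_getElem?_getD, List.getElem?_eq_getElem hr]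
      rfl
    refine ⟨(c : Int), ?_, ?_⟩
    · rw [List.mem_filter]
      constructor
      · rw [PySem.List.mem_pyRange_one, widthB_eq]
        constructor
        · exact Int.natCast_nonneg c
        · exact_mod_cast hc
      · rw [PySem.List.pyGetD_of_nonneg _ _ (Int.natCast_nonneg c), Int.toNat_natCast, beq_iff_eq]
        rw [← hgd]
        exact hhash
    · simp only [Prod.mk.injEq]
      refine ⟨trivial, ?_⟩
      omega

lemma zip_maps_mem {α β : Type} (f : Nat → α) (g : Nat → β) (m n c : Nat)
    (hm : c < m) (hn : c < n) :
    (f c, g c) ∈ ((List.range m).map f).zip ((List.range n).map g) := by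
  rw [List.mem_iff_getElem]
  refine ⟨c, by simp [List.length_zip]; omega, ?_⟩
  simp [List.getElem_zip]

-- bit e of A's c-th column integer is set exactly on an occupied cell
lemma testBit_binRep (block : List (List Char)) (c e : Nat) (hc : c < pvWidthA block) :
    (pvBinNat ((block.map (fun l => l.getD c ' ')).map (fun x => if x == '#' then '1' else '0'))).testBit e = true
      ↔ CellAt block c e := by
  rw [binNat_eq_ofLE]
  exact testBit_col block c e hc

lemma compatA_iff (L K : List (List Char)) :
    (((pvBinRep L).zip (pvBinRep K)).all fun q => PySem.Int.band q.1 q.2 == 0) = true ↔ ¬ Confl L K := by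
  rw [List.all_eq_true]
  unfold pvBinRep pvColsA
  constructor
  · rintro hall ⟨c, e, hL, hK⟩
    have hcL : c < pvWidthA L := hL.1
    have hcK : c < pvWidthA K := hK.1
    simp only [List.map_map] at hall
    have hmem := zip_maps_mem
      ((fun col : List Char => ((pvBinNat (col.map (fun x => if x == '#' then '1' else '0')) : Nat) : Int))
        ∘ (fun i => L.map (fun l => l.getD i ' ')))
      ((fun col : List Char => ((pvBinNat (col.map (fun x => if x == '#' then '1' else '0')) : Nat) : Int))
        ∘ (fun i => K.map (fun l => l.getD i ' ')))
      (pvWidthA L) (pvWidthA K) c hcL hcK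
    have hq := hall _ hmem
    simp only [Function.comp_apply] at hq
    rw [beq_iff_eq, PySem.Int.band_natCast] at hq
    have hz := Int.natCast_eq_zero.mp hq
    exact (land_eq_zero_iff _ _).mp hz e
      ⟨(testBit_binRep L c e hcL).mpr hL, (testBit_binRep K c e hcK).mpr hK⟩
  · intro hno q hq
    simp only [List.map_map] at hq
    rw [List.mem_iff_getElem] at hq
    obtain ⟨i, hi, rfl⟩ := hq
    have hiL : i < pvWidthA L := by
      simp [List.length_zip] at hi
      omega
    have hiK : i < pvWidthA K := by
      simp [List.length_zip] at hi
      omega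
    rw [List.getElem_zip]
    simp only [List.getElem_map, List.getElem_range, Function.comp_apply]
    rw [beq_iff_eq, PySem.Int.band_natCast, Int.natCast_eq_zero, land_eq_zero_iff]
    intro j hj
    exact hno ⟨i, j, (testBit_binRep L i j hiL).mp hj.1, (testBit_binRep K i j hiK).mp hj.2⟩

lemma compatB_iff (L K : List (List Char)) :
    PySem.Set.isdisjoint (pvCells L) (pvCells K) = true ↔ ¬ Confl L K := by
  have hd : PySem.Set.isdisjoint (pvCells L) (pvCells K) = true
      ↔ ¬ ∃ x ∈ pvCells L, x ∈ pvCells K := by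
    simp [PySem.Set.isdisjoint]
  rw [hd]
  unfold pvCells
  constructor
  · intro h hconfl
    obtain ⟨c, e, hL, hK⟩ := hconfl
    exact h ⟨((c : Int), (e : Int)),
      (PySem.Set.mem_ofList _ _).mpr ((mem_cellsList L _).mpr ⟨c, e, rfl, hL⟩),
      (PySem.Set.mem_ofList _ _).mpr ((mem_cellsList K _).mpr ⟨c, e, rfl, hK⟩)⟩
  · rintro hno ⟨x, hxL, hxK⟩
    obtain ⟨c, e, rfl, hL⟩ := (mem_cellsList L _).mp ((PySem.Set.mem_ofList _ _).mp hxL)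
    obtain ⟨c', e', hx, hK⟩ := (mem_cellsList K _).mp ((PySem.Set.mem_ofList _ _).mp hxK)
    have hc' : c = c' := by
      have h1 : ((c : Int), (e : Int)).1 = ((c' : Int), (e' : Int)).1 := congrArg Prod.fst hx
      simp only at h1
      exact_mod_cast h1
    have he' : e = e' := by
      have h2 : ((c : Int), (e : Int)).2 = ((c' : Int), (e' : Int)).2 := congrArg Prod.snd hx
      simp only at h2
      exact_mod_cast h2
    exact hno ⟨c, e, hL, hc' ▸ he' ▸ hK⟩

-- the core fact: A's zipped bitwise test and B's set-disjointness test agree on every pair of blocks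
lemma compat_eq (L K : List (List Char)) :
    (((pvBinRep L).zip (pvBinRep K)).all fun q => PySem.Int.band q.1 q.2 == 0)
      = PySem.Set.isdisjoint (pvCells L) (pvCells K) := by
  rw [Bool.eq_iff_iff, compatA_iff, compatB_iff]

-- classification of a block (block[0][0] == '.') as both ports perform it
def pvIsKey (b : List String) : Bool :=
  match b with
  | [] => false
  | s :: _ =>
    match s.toList with
    | [] => false
    | ch :: _ => ch == '.'

lemma classify_fold {γ : Type} (f : List String → γ) (l : List (List String))
    (h : ∀ b ∈ l, b ≠ [] ∧ (b.headD "").toList ≠ []) (ka la : List γ) :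
    l.foldl
      (fun (acc : List γ × List γ) b =>
        match PySem.List.pyGet? b 0 with
        | none => acc
        | some s =>
          match PySem.Str.pyGet? s 0 with
          | none => acc
          | some ch => if ch == '.' then (acc.1 ++ [f b], acc.2) else (acc.1, acc.2 ++ [f b]))
      (ka, la)
    = (ka ++ (l.filter pvIsKey).map f, la ++ (l.filter (fun b => !pvIsKey b)).map f) := by
  induction l generalizing ka la with
  | nil => simp
  | cons b t ih =>
    obtain ⟨hb, hh⟩ := h b (List.mem_cons_self ..)
    obtain ⟨s, rest, rfl⟩ := List.exists_cons_of_ne_nil hb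
    have hhead : (List.headD (s :: rest) "").toList ≠ [] := hh
    simp only [List.headD_cons] at hhead
    obtain ⟨ch, cs, hcs⟩ := List.exists_cons_of_ne_nil hhead
    have hget1 : PySem.List.pyGet? (s :: rest) 0 = some s := by simp [pysem]
    have hget2 : PySem.Str.pyGet? s 0 = some ch := by simp [pysem, hcs]
    have hkey : pvIsKey (s :: rest) = (ch == '.') := by
      simp [pvIsKey, hcs]
    rw [List.foldl_cons, hget1]
    simp only [hget2]
    have ht := fun ka la => ih (fun b hb => h b (List.mem_cons_of_mem _ hb)) ka la
    by_cases hch : (ch == '.') = true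
    · rw [if_pos hch, ht, List.filter_cons, List.filter_cons, hkey, hch]
      simp
    · rw [if_neg hch, ht, List.filter_cons, List.filter_cons, hkey,
        eq_false_of_ne_true hch]
      simp

-- ===== B-side counting lemmas =====

-- the inner index loop over one lock's cells, characterised by lookup
lemma mem_getD_inner (cells : List (Int × Int)) (d : PySem.Dict (Int × Int) (PySem.Set Int))
    (i0 : Int) (c : Int × Int) (i : Int) :
    i ∈ (cells.foldl (fun d cell => d.modify cell PySem.Set.empty (fun s => PySem.Set.add s i0)) d).getD c PySem.Set.empty
      ↔ i ∈ d.getD c PySem.Set.empty ∨ (c ∈ cells ∧ i = i0) := by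
  induction cells generalizing d with
  | nil => simp
  | cons x t ih =>
    rw [List.foldl_cons, ih, PySem.Dict.getD_modify]
    by_cases hx : c = x
    · subst hx
      rw [if_pos rfl]
      simp only [PySem.Set.mem_add, List.mem_cons]
      tauto
    · rw [if_neg hx]
      simp only [List.mem_cons]
      tauto

-- the whole inverted index: i is filed under cell c iff i is the id of a lock occupying c
lemma mem_index (locks : List (PySem.Set (Int × Int))) (c : Int × Int) (i : Int) :
    i ∈ (pvIndex locks).getD c PySem.Set.empty
      ↔ ∃ j : Nat, j < locks.length ∧ i = (j : Int) ∧ c ∈ locks.getD j PySem.Set.empty := by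
  induction locks using List.reverseRecOn with
  | nil => simp [pvIndex, PySem.List.enumerate_nil]
  | append_singleton t l ih =>
    unfold pvIndex at ih ⊢
    rw [PySem.List.enumerate_append, List.foldl_append, PySem.List.enumerate_cons,
      PySem.List.enumerate_nil, List.foldl_cons, List.foldl_nil]
    rw [mem_getD_inner, ih]
    constructor
    · rintro (⟨j, hj, rfl, hc⟩ | ⟨hc, rfl⟩)
      · exact ⟨j, by simp; omega, rfl, by rwa [List.getD_append _ _ _ _ hj]⟩
      · refine ⟨t.length, by simp, by simp, ?_⟩
        rw [List.getD_eq_getElem?_getD]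
        simp [hc]
    · rintro ⟨j, hj, rfl, hc⟩
      rw [List.length_append, List.length_singleton] at hj
      by_cases hjt : j < t.length
      · exact Or.inl ⟨j, hjt, rfl, by rwa [List.getD_append _ _ _ _ hjt] at hc⟩
      · have hje : j = t.length := by omega
        subst hje
        rw [List.getD_eq_getElem?_getD] at hc
        simp at hc
        exact Or.inr ⟨hc, by simp⟩

lemma mem_bad (index : PySem.Dict (Int × Int) (PySem.Set Int)) (key : PySem.Set (Int × Int)) (i : Int) :
    i ∈ pvBad index key ↔ ∃ cell ∈ key, i ∈ index.getD cell PySem.Set.empty := by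
  have aux : ∀ (ks : List (Int × Int)) (b0 : PySem.Set Int),
      i ∈ ks.foldl (fun bad cell => PySem.Set.union bad (index.getD cell PySem.Set.empty)) b0
        ↔ i ∈ b0 ∨ ∃ cell ∈ ks, i ∈ index.getD cell PySem.Set.empty := by
    intro ks
    induction ks with
    | nil => simp
    | cons x t ih =>
      intro b0
      rw [List.foldl_cons, ih, PySem.Set.mem_union]
      simp only [List.mem_cons]
      constructor
      · rintro ((h | h) | ⟨cell, hc, hm⟩)
        · exact Or.inl h
        · exact Or.inr ⟨x, Or.inl rfl, h⟩
        · exact Or.inr ⟨cell, Or.inr hc, hm⟩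
      · rintro (h | ⟨cell, (rfl | hc), hm⟩)
        · exact Or.inl (Or.inl h)
        · exact Or.inl (Or.inr hm)
        · exact Or.inr ⟨cell, hc, hm⟩
  rw [pvBad, aux]
  simp [PySem.Set.empty]

lemma nodup_bad (index : PySem.Dict (Int × Int) (PySem.Set Int)) (key : PySem.Set (Int × Int)) :
    (pvBad index key).Nodup := by
  have aux : ∀ (ks : List (Int × Int)) (b0 : PySem.Set Int), b0.Nodup →
      (ks.foldl (fun bad cell => PySem.Set.union bad (index.getD cell PySem.Set.empty)) b0).Nodup := by
    intro ks
    induction ks with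
    | nil => exact fun b0 h => h
    | cons x t ih => exact fun b0 h => ih _ (PySem.Set.nodup_union _ _ h)
  exact aux _ _ List.nodup_nil

-- countP over a list equals countP of the predicate on indices
lemma countP_range_getD {α : Type} (xs : List α) (d : α) (p : α → Bool) :
    (List.range xs.length).countP (fun j => p (xs.getD j d)) = xs.countP p := by
  induction xs using List.reverseRecOn with
  | nil => rfl
  | append_singleton t x ih =>
    rw [List.length_append, List.length_singleton, List.range_succ, List.countP_append,
      List.countP_append]
    have h1 : (List.range t.length).countP (fun j => p ((t ++ [x]).getD j d))
        = (List.range t.length).countP (fun j => p (t.getD j d)) := by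
      apply List.countP_congr
      intro j hj
      rw [List.mem_range] at hj
      rw [List.getD_append _ _ _ _ hj]
    have h2 : (t ++ [x]).getD t.length d = x := by
      rw [List.getD_eq_getElem?_getD]
      simp
    rw [h1, ih, List.countP_cons, List.countP_cons, List.countP_nil, List.countP_nil, h2]

-- |bad| counts the locks that conflict with the key
lemma len_bad (locks : List (PySem.Set (Int × Int))) (key : PySem.Set (Int × Int)) :
    PySem.Set.len (pvBad (pvIndex locks) key)
      = ((List.range locks.length).countP
          (fun j => !(PySem.Set.isdisjoint (locks.getD j PySem.Set.empty) key)) : Nat) := by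
  set P : Nat → Bool := fun j => !(PySem.Set.isdisjoint (locks.getD j PySem.Set.empty) key) with hP
  set tl : List Int := ((List.range locks.length).filter P).map (Nat.cast : Nat → Int) with htl
  have hmem : ∀ i : Int, i ∈ pvBad (pvIndex locks) key ↔ i ∈ tl := by
    intro i
    rw [mem_bad, htl, List.mem_map]
    constructor
    · rintro ⟨cell, hck, hm⟩
      rw [mem_index] at hm
      obtain ⟨j, hj, rfl, hcl⟩ := hm
      refine ⟨j, ?_, rfl⟩
      rw [List.mem_filter, List.mem_range]
      refine ⟨hj, ?_⟩
      rw [hP]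
      simp only [Bool.not_eq_eq_eq_not, Bool.not_true]
      rw [← Bool.not_eq_true, PySem.Set.isdisjoint_iff]
      push_neg
      exact ⟨cell, hcl, hck⟩
    · rintro ⟨j, hj, rfl⟩
      rw [List.mem_filter, List.mem_range] at hj
      obtain ⟨hjl, hpj⟩ := hj
      rw [hP] at hpj
      simp only [Bool.not_eq_eq_eq_not, Bool.not_true] at hpj
      rw [← Bool.not_eq_true, PySem.Set.isdisjoint_iff] at hpj
      push_neg at hpj
      obtain ⟨cell, hcl, hck⟩ := hpj
      exact ⟨cell, hck, (mem_index _ _ _).mpr ⟨j, hjl, rfl, hcl⟩⟩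
  have hnd2 : tl.Nodup := by
    rw [htl]
    exact (((List.nodup_range).filter P).map Nat.cast_injective)
  have hperm : (pvBad (pvIndex locks) key).Perm tl :=
    (List.perm_ext_iff_of_nodup (nodup_bad _ _) hnd2).mpr hmem
  have hlen := hperm.length_eq
  rw [htl, List.length_map, ← List.countP_eq_length_filter] at hlen
  simp [PySem.Set.len, hlen]

-- per-key complement count = direct count of compatible locks
lemma key_term (locks : List (PySem.Set (Int × Int))) (key : PySem.Set (Int × Int)) :
    (locks.length : Int) - PySem.Set.len (pvBad (pvIndex locks) key)
      = (locks.countP (fun l => PySem.Set.isdisjoint l key) : Nat) := by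
  rw [len_bad]
  have h1 : (List.range locks.length).countP
        (fun j => PySem.Set.isdisjoint (locks.getD j PySem.Set.empty) key)
      + (List.range locks.length).countP
        (fun j => !(PySem.Set.isdisjoint (locks.getD j PySem.Set.empty) key))
      = locks.length := by
    have hlr := List.length_eq_countP_add_countP
      (p := fun j => PySem.Set.isdisjoint (locks.getD j PySem.Set.empty) key)
      (l := List.range locks.length)
    simp only [decide_not, Bool.decide_eq_true, List.length_range] at hlr
    omega
  rw [countP_range_getD locks PySem.Set.empty (fun l => PySem.Set.isdisjoint l key)] at h1
  omega

lemma sum_map_ite_one_zero_nat {α : Type} (p : α → Bool) (l : List α) :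
    (l.map (fun x => if p x then 1 else 0)).sum = l.countP p := by
  induction l with
  | nil => rfl
  | cons x t ih => by_cases h : p x <;> simp [h, ih] <;> omega

-- exchanging the two summations: Σ_lock Σ_key = Σ_key Σ_lock
lemma sum_exchange {α β : Type} (locks : List α) (keys : List β) (p : α → β → Bool) :
    (locks.map (fun l => keys.countP (fun k => p l k))).sum
      = (keys.map (fun k => locks.countP (fun l => p l k))).sum := by
  induction locks with
  | nil => simp
  | cons l t ih =>
    rw [List.map_cons, List.sum_cons, ih]
    have hstep : (keys.map (fun k => (l :: t).countP (fun l' => p l' k)))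
        = keys.map (fun k => (if p l k then 1 else 0) + t.countP (fun l' => p l' k)) := by
      apply List.map_congr_left
      intro k _
      rw [List.countP_cons]
      by_cases h : p l k <;> simp [h] <;> omega
    rw [hstep]
    have hsplit : (keys.map (fun k => (if p l k then 1 else 0) + t.countP (fun l' => p l' k))).sum
        = (keys.map (fun k => if p l k then 1 else 0)).sum
          + (keys.map (fun k => t.countP (fun l' => p l' k))).sum :=
      List.sum_map_add
    rw [hsplit, sum_map_ite_one_zero_nat]

lemma sum_map_cast {α : Type} (l : List α) (f : α → Nat) :
    (l.map (fun x => (f x : Int))).sum = ((l.map f).sum : Nat) := by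
  induction l with
  | nil => rfl
  | cons x t ih => simp [ih]

-- ===== VERDICT (by name: the statement is the Claim_ definition above) =====
theorem solve_spec : Claim_equal_solve := by
  unfold Claim_equal_solve
  intro data _ hpre
  unfold Spec_solve solve solve_alt
  rw [classify_fold (fun b => pvBinRep (b.map String.toList)) data hpre [] [],
    classify_fold (fun b => pvCells (b.map String.toList)) data hpre [] []]
  simp only [List.nil_append]
  simp only [PySem.List.foldl_count_if, PySem.List.foldl_add, zero_add]
  simp only [key_term]
  simp only [List.map_map, List.countP_map, Function.comp_def, compat_eq]
  rw [sum_map_cast, sum_map_cast, Nat.cast_inj]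
  exact sum_exchange _ _ _
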